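-- pv_equiv track=rewrite | github.com/RoggenRentier/AdventOfCode2021 | 03a.py | getGamma
-- ===== SOURCE A (Python) =====
-- def getGamma(lines):
--
--     zero = 0
--     one = 0
--     arr = [0] * len(lines[0])
--
--     for i in range(0, len(lines[0])):
--         for line in lines:
--             if line[i] == "0":
--                 zero += 1
--             else:
--                 one += 1
--         if zero > one:
--             arr[i] = 0
--         else:
--             arr[i] = 1
--         zero = 0
--         one = 0
--
--     return arr
-- ===== SOURCE B (Python) =====
-- def getGamma(lines):
--     n = len(lines)
--     ones = [0] * len(lines[0])
--     for line in lines: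
--         ones = [c + (ch != "0") for c, ch in zip(ones, line)]
--     return [1 if 2 * c >= n else 0 for c in ones]
-- ===== Notes on version B (the rewrite author's own statement) =====
-- stated objective: alternative
-- what changed: Column-major nested counting with explicit zero/one counters replaced by a single row-major accumulation of a per-column ones table (via zip over each line) followed by a separate threshold pass 2*ones[i] >= n.
import Mathlib
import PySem

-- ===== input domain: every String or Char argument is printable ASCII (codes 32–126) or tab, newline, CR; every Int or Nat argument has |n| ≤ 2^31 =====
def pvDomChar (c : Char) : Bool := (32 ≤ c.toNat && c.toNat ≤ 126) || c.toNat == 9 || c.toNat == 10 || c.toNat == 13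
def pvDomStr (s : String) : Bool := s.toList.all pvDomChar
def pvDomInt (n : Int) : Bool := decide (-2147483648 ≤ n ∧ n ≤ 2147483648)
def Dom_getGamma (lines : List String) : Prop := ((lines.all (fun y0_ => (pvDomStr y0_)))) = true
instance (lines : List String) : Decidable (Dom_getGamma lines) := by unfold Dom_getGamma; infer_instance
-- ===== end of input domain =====

-- B replaces A's column-major nested counting by one row-major ones-table accumulation plus a
-- separate threshold pass (alternative decomposition, same asymptotic cost, return value identical on Pre_).

-- ===== PORT A =====
-- A-side helper: A's inner 'for line in lines' counting loop for column i (zero, one counters).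
def getGammaCol (lines : List String) (i : Int) : Int × Int :=
  lines.foldl
    (fun (zo : Int × Int) line =>
      if PySem.Str.pyGet? line i = some '0' then (zo.1 + 1, zo.2) else (zo.1, zo.2 + 1))
    (0, 0)

def getGamma (lines : List String) : List Int :=
  let arr : List Int := List.replicate (lines.headD "").toList.length 0
  (PySem.List.pyRange 0 ((lines.headD "").toList.length : Int) 1).foldl
    (fun arr i =>
      PySem.List.pySetD arr i
        (if (getGammaCol lines i).1 > (getGammaCol lines i).2 then 0 else 1))
    arr

-- ===== PORT B =====
def getGamma_alt (lines : List String) : List Int :=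
  let n : Int := lines.length
  let ones : List Int := List.replicate (lines.headD "").toList.length 0
  let ones := lines.foldl
    (fun ones line =>
      (ones.zip line.toList).map (fun p => p.1 + if p.2 ≠ '0' then 1 else 0))
    ones
  ones.map (fun c => if 2 * c ≥ n then 1 else 0)

-- ===== PRECONDITION & SPEC =====
-- Pre_ excludes exactly the inputs where A raises IndexError: the empty list (lines[0]) and
-- lists containing a line shorter than the first line (line[i]).
def Pre_getGamma (lines : List String) : Prop :=
  lines ≠ [] ∧ ∀ l ∈ lines, (lines.headD "").toList.length ≤ l.toList.length
instance (lines : List String) : Decidable (Pre_getGamma lines) := by unfold Pre_getGamma; infer_instance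
def pvWitness_getGamma : List String := ["10", "01", "11"]
def Spec_getGamma (lines : List String) (out : List Int) : Prop := out = getGamma_alt lines
instance (lines : List String) (out : List Int) : Decidable (Spec_getGamma lines out) := by unfold Spec_getGamma; infer_instance

-- ===== CLAIM (what is proved, stated in full; the proofs are below) =====
def Claim_equal_getGamma : Prop := ∀ (lines : List String), Dom_getGamma lines → Pre_getGamma lines → Spec_getGamma lines (getGamma lines)

-- ===== LEMMAS AND PROOFS =====

-- A's inner per-column loop: the pair of counters is (z + countP p, o + countP ¬p).
theorem pv_foldl_pair_count (lines : List String) (p : String → Prop) [DecidablePred p] :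
    ∀ z o : Int, lines.foldl
      (fun (zo : Int × Int) line => if p line then (zo.1 + 1, zo.2) else (zo.1, zo.2 + 1)) (z, o)
      = (z + lines.countP (fun l => decide (p l)), o + lines.countP (fun l => !decide (p l))) := by
  induction lines with
  | nil => simp
  | cons l ls ih =>
      intro z o
      by_cases h : p l <;> simp [h, ih] <;> ring

-- A's outer loop: folding set over range builds the table pointwise.
theorem pv_fold_set (g : Nat → Int) :
    ∀ (n : Nat) (arr : List Int), n ≤ arr.length →
      (List.range n).foldl (fun a k => a.set k (g k)) arr
        = (List.range n).map g ++ arr.drop n := by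
  intro n
  induction n with
  | zero => simp
  | succ m ih =>
      intro arr h
      rw [List.range_succ, List.foldl_append, ih arr (by omega), List.foldl_cons, List.foldl_nil]
      rw [List.set_append_right _ _ (by simp)]
      simp only [List.length_map, List.length_range, Nat.sub_self]
      rw [List.drop_eq_getElem_cons (by omega), List.set_cons_zero]
      simp

-- B's accumulation loop: the ones table after the fold, pointwise.
theorem pv_fold_ones (lines : List String) :
    ∀ (ones : List Int), (∀ l ∈ lines, ones.length ≤ l.toList.length) →
      lines.foldl
        (fun ones line => (ones.zip line.toList).map (fun p => p.1 + if p.2 ≠ '0' then 1 else 0))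
        ones
      = (List.range ones.length).map
          (fun i => ones.getD i 0 + (lines.countP (fun l => l.toList.getD i '0' != '0') : Int)) := by
  induction lines with
  | nil =>
      intro ones _
      refine List.ext_getElem (by simp) ?_
      intro i h1 h2
      have hi : i < ones.length := h1
      simp [List.getElem_map, List.getElem_range, List.getElem?_eq_getElem hi]
  | cons l ls ih =>
      intro ones h
      have hl : ones.length ≤ l.toList.length := h l (by simp)
      have hzl : (ones.zip l.toList).length = ones.length := by
        rw [List.length_zip]; omega
      have hlen : ((ones.zip l.toList).map (fun p => p.1 + if p.2 ≠ '0' then 1 else 0)).length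
          = ones.length := by rw [List.length_map]; exact hzl
      rw [List.foldl_cons, ih _ (by intro l' hl'; rw [hlen]; exact h l' (by simp [hl']))]
      rw [hlen]
      apply List.map_congr_left
      intro i hi
      have hi' : i < ones.length := List.mem_range.mp hi
      have hi'' : i < l.toList.length := by omega
      have hm : i < ((ones.zip l.toList).map (fun p => p.1 + if p.2 ≠ '0' then 1 else 0)).length := by
        rw [hlen]; exact hi'
      rw [List.getD_eq_getElem _ _ hm, List.getElem_map,
        List.getElem_zip, List.getD_eq_getElem _ _ hi', List.countP_cons]
      have hgd : l.toList.getD i '0' = l.toList[i] := List.getD_eq_getElem _ _ hi''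
      rw [hgd]
      by_cases hc : l.toList[i] = '0'
      · simp [hc]
      · simp [hc]; omega

theorem getGamma_spec_aux (lines : List String) (h : Pre_getGamma lines) :
    getGamma lines = getGamma_alt lines := by
  obtain ⟨hne, hlen0⟩ := h
  unfold getGamma getGamma_alt
  set w : Nat := (lines.headD "").toList.length with hw
  have hlen : ∀ l ∈ lines, w ≤ l.toList.length := hlen0
  rw [PySem.List.pyRange_one]
  simp only [zero_add, Int.toNat_natCast, List.foldl_map, sub_zero,
    PySem.List.pySetD_natCast]
  rw [pv_fold_set
    (fun k => if (getGammaCol lines (k : Int)).1 > (getGammaCol lines (k : Int)).2 then (0:Int) else 1)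
    w (List.replicate w 0) (by simp)]
  rw [pv_fold_ones lines (List.replicate w 0) (by simpa using hlen)]
  simp only [List.length_replicate, List.drop_replicate, Nat.sub_self, List.replicate_zero,
    List.append_nil, List.map_map]
  apply List.map_congr_left
  intro k hk
  have hk' : k < w := List.mem_range.mp hk
  simp only [Function.comp]
  simp only [getGammaCol]
  simp only [pv_foldl_pair_count lines (fun line => PySem.Str.pyGet? line (k : Int) = some '0') 0 0]
  have hc0 : lines.countP (fun line => decide (PySem.Str.pyGet? line (k : Int) = some '0'))
      = lines.countP (fun l => !(l.toList.getD k '0' != '0')) := by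
    apply List.countP_congr
    intro l hl
    have hkl : k < l.toList.length := lt_of_lt_of_le hk' (hlen l hl)
    simp [List.getElem?_eq_getElem hkl]
  have hc1 : lines.countP (fun l => !decide (PySem.Str.pyGet? l (k : Int) = some '0'))
      = lines.countP (fun l => l.toList.getD k '0' != '0') := by
    apply List.countP_congr
    intro l hl
    have hkl : k < l.toList.length := lt_of_lt_of_le hk' (hlen l hl)
    simp [List.getElem?_eq_getElem hkl]
  simp only [hc0, hc1, zero_add]
  have h0 : (List.replicate w (0:Int)).getD k 0 = 0 := by
    rw [List.getD_eq_getElem _ _ (by simpa using hk')]; simp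
  simp only [h0, zero_add]
  set c1 := lines.countP (fun l => l.toList.getD k '0' != '0') with hc1d
  set c0 := lines.countP (fun l => !(l.toList.getD k '0' != '0')) with hc0d
  have hsum : lines.length = c1 + c0 := by
    rw [hc1d, hc0d,
      List.length_eq_countP_add_countP (p := fun l => l.toList.getD k '0' != '0') (l := lines)]
    congr 1
    exact List.countP_congr (fun l _ => by by_cases hgd : l.toList.getD k '0' = '0' <;> simp_all)
  split_ifs with h1 h2 h2 <;> omega

-- ===== VERDICT (by name: the statement is the Claim_ definition above) =====
theorem getGamma_spec : Claim_equal_getGamma := by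
  intro lines _ hpre
  exact getGamma_spec_aux lines hpre
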